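-- pv_equiv track=rewrite | github.com/yannickloth/W33-Theory | legacy/one_off_root/_explore29b.py | fib_entry
-- ===== SOURCE A (Python) =====
-- def fib_entry(n):
--     if n <= 0: return None
--     a, b = 0, 1
--     for m in range(1, 10*n+1):
--         a, b = b, a+b
--         if a % n == 0:
--             return m
--     return None
-- ===== SOURCE B (Python) =====
-- def fib_entry(n):
--     if n <= 0:
--         return None
--     # Stage 1: generate the first 10*n Fibonacci numbers reduced modulo n
--     # (fib(1), fib(2), ... mod n) as a table of mod-n residues.
--     k = 10 * n
--     seq = [0] * k
--     a, b = 1 % n, 1 % n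
--     for i in range(k):
--         seq[i] = a
--         a, b = b, (a + b) % n
--     # Stage 2: scan the table for the first zero residue (1-based position).
--     for i, v in enumerate(seq, 1):
--         if v == 0:
--             return i
--     return None
-- ===== Notes on version B (the rewrite author's own statement) =====
-- stated objective: alternative
-- what changed: B is a staged pipeline: it first materialises a table of the first 10n Fibonacci residues modulo n (all arithmetic reduced mod n, so values stay O(log n) bits), then does a separate enumerate scan of that table for the first zero, instead of A's single fused loop over full-size exponentially growing Fibonacci integers with an in-loop divisibility test and early return; it trades A's early exit for bounded-size arithmetic.
import Mathlib
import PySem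

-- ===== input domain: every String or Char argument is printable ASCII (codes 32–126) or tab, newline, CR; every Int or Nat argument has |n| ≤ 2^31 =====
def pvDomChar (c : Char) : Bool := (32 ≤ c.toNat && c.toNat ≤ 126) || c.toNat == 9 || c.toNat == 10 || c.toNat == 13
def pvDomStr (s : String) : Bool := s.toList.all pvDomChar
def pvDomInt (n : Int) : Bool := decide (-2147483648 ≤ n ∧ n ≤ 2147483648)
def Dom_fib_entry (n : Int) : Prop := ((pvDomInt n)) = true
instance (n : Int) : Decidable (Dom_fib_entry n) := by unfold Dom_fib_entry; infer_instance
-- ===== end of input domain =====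

-- B replaces A's fused loop over full-size Fibonacci integers by a staged pipeline:
-- generate the mod-n residue table, then scan it for the first zero (objective: alternative).

-- ===== PORT A =====
-- A's 'for m in range(1, 10*n+1)' with early return: recursion on the remaining
-- iteration count, carrying the current m (lazy, like Python's range iterator).
def fibEntryLoopA (n : Int) : Nat → Int → Int → Int → Option Int
  | 0, _, _, _ => none
  | k + 1, m, a, b =>
    let a' := b
    let b' := a + b
    if PySem.Int.mod a' n = 0 then some m else fibEntryLoopA n k (m + 1) a' b'

def fib_entry (n : Int) : Option Int :=
  if n ≤ 0 then none
  else fibEntryLoopA n (10 * n).toNat 1 0 1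

-- ===== PORT B =====
-- Stage 1 of Source B: the table of the first k Fibonacci residues mod n, filled in
-- order (tail-recursive accumulator, reversed at the end).
def fibModSeqAux (n : Int) : Nat → Int → Int → List Int → List Int
  | 0, _, _, acc => acc.reverse
  | k + 1, a, b, acc => fibModSeqAux n k b (PySem.Int.mod (a + b) n) (a :: acc)

def fibModSeq (n : Int) (k : Nat) (a b : Int) : List Int :=
  fibModSeqAux n k a b []

-- Stage 2 of Source B: scan the table for the first zero (1-based position counter).
def findFirstZero : List Int → Int → Option Int
  | [], _ => none
  | v :: vs, i => if v = 0 then some i else findFirstZero vs (i + 1)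

def fib_entry_alt (n : Int) : Option Int :=
  if n ≤ 0 then none
  else findFirstZero (fibModSeq n (10 * n).toNat (PySem.Int.mod 1 n) (PySem.Int.mod 1 n)) 1

-- ===== PRECONDITION & SPEC =====
def Spec_fib_entry (n : Int) (out : Option Int) : Prop := out = fib_entry_alt n
instance (n : Int) (out : Option Int) : Decidable (Spec_fib_entry n out) := by unfold Spec_fib_entry; infer_instance

-- ===== CLAIM =====
def Claim_equal_fib_entry : Prop := ∀ (n : Int), Dom_fib_entry n → Spec_fib_entry n (fib_entry n)

-- ===== LEMMAS AND PROOFS =====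

-- Non-tail reference form of the residue table, for reasoning.
def fibModSeqR (n : Int) : Nat → Int → Int → List Int
  | 0, _, _ => []
  | k + 1, a, b => a :: fibModSeqR n k b (PySem.Int.mod (a + b) n)

theorem fibModSeqAux_eq (n : Int) :
    ∀ (k : Nat) (a b : Int) (acc : List Int),
      fibModSeqAux n k a b acc = acc.reverse ++ fibModSeqR n k a b := by
  intro k
  induction k with
  | zero => intro a b acc; simp [fibModSeqAux, fibModSeqR]
  | succ k ih =>
    intro a b acc
    simp [fibModSeqAux, fibModSeqR, ih]

-- Scanning B's residue table equals running A's counted loop.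
theorem scan_eq_loop (n : Int) (hn : 0 < n) :
    ∀ (k : Nat) (lo a b : Int),
      findFirstZero (fibModSeqR n k (PySem.Int.mod b n) (PySem.Int.mod (a + b) n)) lo
        = fibEntryLoopA n k lo a b := by
  intro k
  induction k with
  | zero => intro lo a b; rfl
  | succ k ih =>
    intro lo a b
    simp only [fibModSeqR, findFirstZero, fibEntryLoopA]
    by_cases h : PySem.Int.mod b n = 0
    · simp [h]
    · rw [if_neg h, if_neg h]
      have hmod : PySem.Int.mod (PySem.Int.mod b n + PySem.Int.mod (a + b) n) n
          = PySem.Int.mod (b + (a + b)) n := by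
        simp [PySem.Int.mod_eq_emod_of_pos hn, Int.add_emod]
      rw [hmod]
      exact ih (lo + 1) b (a + b)

-- ===== VERDICT =====
theorem fib_entry_spec : Claim_equal_fib_entry := by
  intro n _
  unfold Spec_fib_entry fib_entry fib_entry_alt
  by_cases hn : n ≤ 0
  · simp [hn]
  · have hn' : 0 < n := by omega
    rw [if_neg hn, if_neg hn]
    rw [fibModSeq, fibModSeqAux_eq, List.reverse_nil, List.nil_append]
    have h := scan_eq_loop n hn' (10 * n).toNat 1 0 1
    simp only [zero_add] at h
    exact h.symm
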